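-- pv_equiv track=rewrite | github.com/TumsaUmata/the_last_lap | String/making-anagrams.py | number_needed
-- ===== SOURCE A (Python) =====
-- def number_needed(a, b):
--     chars_dict = dict()
--
--     for char in a:
--         if char in chars_dict:
--             chars_dict[char] += 1
--         else:
--             chars_dict[char] = 1
--
--     for char in b:
--         if char in chars_dict:
--             chars_dict[char] -= 1
--         else:
--             chars_dict[char] = -1
--
--     sum_diff = 0
--     for char in chars_dict.keys():
--         sum_diff += abs(chars_dict[char])
--
--     return sum_diff
-- ===== SOURCE B (Python) =====
-- def number_needed(a, b):
--     sa = sorted(a)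
--     sb = sorted(b)
--     i = j = deletions = 0
--     while i < len(sa) and j < len(sb):
--         if sa[i] == sb[j]:
--             i += 1
--             j += 1
--         elif sa[i] < sb[j]:
--             deletions += 1
--             i += 1
--         else:
--             deletions += 1
--             j += 1
--     return deletions + (len(sa) - i) + (len(sb) - j)
-- ===== Notes on version B (the rewrite author's own statement) =====
-- stated objective: alternative
-- what changed: Replaced A's character-frequency dictionary (count over a, decrement over b, sum of absolute values over the keys) by a two-pointer merge over the sorted character lists of a and b that counts mismatches and leftover suffixes.
import Mathlib
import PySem

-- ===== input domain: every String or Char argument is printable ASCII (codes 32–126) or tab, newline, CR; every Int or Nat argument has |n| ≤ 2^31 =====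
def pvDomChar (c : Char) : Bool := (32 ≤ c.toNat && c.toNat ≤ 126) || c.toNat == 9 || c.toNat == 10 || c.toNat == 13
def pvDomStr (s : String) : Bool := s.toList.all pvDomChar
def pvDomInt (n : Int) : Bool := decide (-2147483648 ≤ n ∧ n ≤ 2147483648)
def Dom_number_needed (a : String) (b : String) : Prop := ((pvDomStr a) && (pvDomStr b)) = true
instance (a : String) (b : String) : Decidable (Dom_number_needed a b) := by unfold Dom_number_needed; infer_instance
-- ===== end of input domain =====

-- B replaces A's frequency-dictionary pass by a two-pointer merge of the two sorted character lists (alternative decomposition, same result).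

-- ===== PORT A =====
-- literal transliteration of A: count chars of a in a dict, decrement for chars of b, sum |values| over the keys
def number_needed (a : String) (b : String) : Int :=
  let d1 := a.toList.foldl
    (fun d c => if d.contains c then d.insert c (d.getD c 0 + 1) else d.insert c (1 : Int))
    PySem.Dict.empty
  let d2 := b.toList.foldl
    (fun d c => if d.contains c then d.insert c (d.getD c 0 - 1) else d.insert c (-1 : Int))
    d1
  d2.keys.foldl (fun s k => s + |d2.getD k 0|) 0

-- ===== PORT B =====
-- the while loop of Source B over indices i, j becomes structural recursion on the two remaining suffixes
def nnMerge : List Char → List Char → Int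
  | [], ys => (ys.length : Int)
  | x :: xs, [] => ((x :: xs).length : Int)
  | x :: xs, y :: ys =>
      if x = y then nnMerge xs ys
      else if x < y then 1 + nnMerge xs (y :: ys)
      else 1 + nnMerge (x :: xs) ys
termination_by xs ys => xs.length + ys.length

def number_needed_alt (a : String) (b : String) : Int :=
  nnMerge (PySem.List.sorted a.toList (fun c => c) false)
          (PySem.List.sorted b.toList (fun c => c) false)

-- ===== PRECONDITION & SPEC =====
def Spec_number_needed (a : String) (b : String) (out : Int) : Prop := out = number_needed_alt a b
instance (a : String) (b : String) (out : Int) : Decidable (Spec_number_needed a b out) := by unfold Spec_number_needed; infer_instance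

-- ===== CLAIM (what is proved, stated in full; the proofs are below) =====
def Claim_equal_number_needed : Prop := ∀ (a : String) (b : String), Dom_number_needed a b → Spec_number_needed a b (number_needed a b)

-- ===== LEMMAS AND PROOFS =====

-- ---- multiset symmetric-difference toolkit ----
lemma count_sub_coe (l m : List Char) (c : Char) :
    Multiset.count c ((l : Multiset Char) - (m : Multiset Char)) = l.count c - m.count c := by
  rw [Multiset.count_sub]; simp

lemma msub_cons_both (x : Char) (s t : Multiset Char) : (x ::ₘ s) - (x ::ₘ t) = s - t := by
  rw [Multiset.sub_cons, Multiset.erase_cons_head]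

lemma msub_cons_left (x : Char) (s t : Multiset Char) (h : x ∉ t) :
    (x ::ₘ s) - t = x ::ₘ (s - t) := by
  ext c
  rw [Multiset.count_cons, Multiset.count_sub, Multiset.count_cons, Multiset.count_sub]
  by_cases hc : c = x
  · subst hc; rw [Multiset.count_eq_zero.mpr h]; omega
  · simp [hc]

lemma msub_cons_right (x : Char) (s t : Multiset Char) (h : x ∉ t) :
    t - (x ::ₘ s) = t - s := by
  rw [Multiset.sub_cons, Multiset.erase_of_notMem h]

-- ---- B's merge counts the symmetric multiset difference of two sorted lists ----
lemma nnMerge_eq' : ∀ (n : ℕ) (xs ys : List Char), xs.length + ys.length ≤ n →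
    xs.Pairwise (· ≤ ·) → ys.Pairwise (· ≤ ·) →
    nnMerge xs ys = ((((xs : Multiset Char) - ys).card + ((ys : Multiset Char) - xs).card : ℕ) : Int) := by
  intro n
  induction n with
  | zero =>
    intro xs ys hlen _ _
    have : xs = [] ∧ ys = [] := by
      constructor <;> (cases xs <;> cases ys <;> simp_all)
    obtain ⟨rfl, rfl⟩ := this
    simp [nnMerge]
  | succ n ih =>
    intro xs ys hlen hx hy
    cases xs with
    | nil => simp [nnMerge]
    | cons x xs =>
      cases ys with
      | nil => simp [nnMerge]
      | cons y ys =>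
        simp only [List.length_cons] at hlen
        have hx' := hx.of_cons
        have hy' := hy.of_cons
        by_cases hxy : x = y
        · subst hxy
          rw [nnMerge, if_pos rfl, ih xs ys (by omega) hx' hy']
          simp only [← Multiset.cons_coe]
          rw [msub_cons_both, msub_cons_both]
        · by_cases hlt : x < y
          · have h0 : x ∉ (y ::ₘ (ys : Multiset Char)) := by
              simp only [Multiset.mem_cons, Multiset.mem_coe]
              rintro (rfl | hmem)
              · exact hxy rfl
              · exact absurd (lt_of_lt_of_le hlt (List.rel_of_pairwise_cons hy hmem)) (lt_irrefl x)
            rw [nnMerge, if_neg hxy, if_pos hlt,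
              ih xs (y :: ys) (by simp only [List.length_cons]; omega) hx' hy]
            simp only [← Multiset.cons_coe]
            rw [msub_cons_left x _ _ h0, msub_cons_right x _ _ h0, Multiset.card_cons]
            push_cast; ring
          · have hyx : y < x := lt_of_le_of_ne (not_lt.mp hlt) (fun e => hxy e.symm)
            have h0 : y ∉ (x ::ₘ (xs : Multiset Char)) := by
              simp only [Multiset.mem_cons, Multiset.mem_coe]
              rintro (rfl | hmem)
              · exact hxy rfl
              · exact absurd (lt_of_lt_of_le hyx (List.rel_of_pairwise_cons hx hmem)) (lt_irrefl y)
            rw [nnMerge, if_neg hxy, if_neg hlt,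
              ih (x :: xs) ys (by simp only [List.length_cons]; omega) hx hy']
            simp only [← Multiset.cons_coe]
            rw [msub_cons_left y _ _ h0, msub_cons_right y _ _ h0, Multiset.card_cons]
            push_cast; ring

-- ---- A's loop bodies are plain insert-of-updated-value folds ----
lemma step_inc_eq :
    (fun (d : PySem.Dict Char Int) (c : Char) =>
        if d.contains c then d.insert c (d.getD c 0 + 1) else d.insert c (1 : Int))
      = fun d c => d.insert c (d.getD c 0 + 1) := by
  funext d c
  by_cases h : d.contains c
  · simp [h]
  · have h' : d.contains c = false := by simpa using h
    rw [if_neg h, PySem.Dict.getD_of_not_contains _ _ h']; norm_num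

lemma step_dec_eq :
    (fun (d : PySem.Dict Char Int) (c : Char) =>
        if d.contains c then d.insert c (d.getD c 0 - 1) else d.insert c (-1 : Int))
      = fun d c => d.insert c (d.getD c 0 - 1) := by
  funext d c
  by_cases h : d.contains c
  · simp [h]
  · have h' : d.contains c = false := by simpa using h
    rw [if_neg h, PySem.Dict.getD_of_not_contains _ _ h']; norm_num

lemma getD_foldl_insert_sub_one (l : List Char) (d : PySem.Dict Char Int) (v : Char) :
    (l.foldl (fun d c => d.insert c (d.getD c 0 - 1)) d).getD v 0 = d.getD v 0 - l.count v := by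
  induction l generalizing d with
  | nil => simp
  | cons x xs ih =>
      simp only [List.foldl_cons, ih, PySem.Dict.getD_insert, List.count_cons]
      by_cases h : v = x
      · simp [h]; ring
      · simp [h]; exact fun e => absurd e.symm h

-- ---- sum of |count a − count b| over the distinct chars of a++b = symmetric-difference size ----
lemma sum_count_sub (L as bs : List Char) (hnd : L.Nodup) (hsub : ∀ c ∈ as, c ∈ L) :
    (L.map (fun k => as.count k - bs.count k)).sum
      = ((as : Multiset Char) - (bs : Multiset Char)).card := by
  have hss : ((as : Multiset Char) - (bs : Multiset Char)).toFinset ⊆ L.toFinset := by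
    intro k hk
    rw [Multiset.mem_toFinset] at hk
    have : k ∈ (as : Multiset Char) := Multiset.mem_of_le (Multiset.sub_le_self _ _) hk
    rw [List.mem_toFinset]
    exact hsub k (by simpa using this)
  calc (L.map (fun k => as.count k - bs.count k)).sum
      = ∑ k ∈ L.toFinset, (as.count k - bs.count k) := (List.sum_toFinset _ hnd).symm
    _ = ∑ k ∈ L.toFinset, ((as : Multiset Char) - (bs : Multiset Char)).count k :=
        Finset.sum_congr rfl (fun k _ => (count_sub_coe _ _ _).symm)
    _ = ∑ k ∈ ((as : Multiset Char) - (bs : Multiset Char)).toFinset,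
          ((as : Multiset Char) - (bs : Multiset Char)).count k :=
        (Finset.sum_subset hss (fun k _ hk =>
          Multiset.count_eq_zero_of_notMem (by simpa using hk))).symm
    _ = _ := Multiset.toFinset_sum_count_eq _

lemma abs_diff_cast (p q : ℕ) : |((p : Int) - q)| = (((p - q) + (q - p) : ℕ) : Int) := by
  rw [Int.abs_eq_natAbs]
  omega

lemma sum_map_cast (L : List Char) (g : Char → ℕ) :
    (L.map (fun k => ((g k : ℕ) : Int))).sum = ((L.map g).sum : Int) := by
  induction L with
  | nil => simp
  | cons x xs ih => simp [ih]

lemma sum_abs_eq (as bs : List Char) :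
    ((PySem.Set.ofList (as ++ bs)).map
      (fun k => |((as.count k : Int)) - (bs.count k : Int)|)).sum
      = ((((as : Multiset Char) - bs).card + ((bs : Multiset Char) - as).card : ℕ) : Int) := by
  have hnd : (PySem.Set.ofList (as ++ bs)).Nodup := PySem.Set.nodup_ofList _
  have h1 : ∀ c ∈ as, c ∈ PySem.Set.ofList (as ++ bs) := by
    intro c hc; rw [PySem.Set.mem_ofList]; exact List.mem_append_left _ hc
  have h2 : ∀ c ∈ bs, c ∈ PySem.Set.ofList (as ++ bs) := by
    intro c hc; rw [PySem.Set.mem_ofList]; exact List.mem_append_right _ hc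
  calc ((PySem.Set.ofList (as ++ bs)).map
      (fun k => |((as.count k : Int)) - (bs.count k : Int)|)).sum
      = ((PySem.Set.ofList (as ++ bs)).map
          (fun k => (((as.count k - bs.count k) + (bs.count k - as.count k) : ℕ) : Int))).sum := by
        simp only [abs_diff_cast]
    _ = (((PySem.Set.ofList (as ++ bs)).map
          (fun k => (as.count k - bs.count k) + (bs.count k - as.count k))).sum : Int) := by
        exact sum_map_cast _ _
    _ = _ := by
        have hsplit : ((PySem.Set.ofList (as ++ bs)).map
            (fun k => (as.count k - bs.count k) + (bs.count k - as.count k))).sum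
            = ((PySem.Set.ofList (as ++ bs)).map (fun k => as.count k - bs.count k)).sum
              + ((PySem.Set.ofList (as ++ bs)).map (fun k => bs.count k - as.count k)).sum := by
          induction (PySem.Set.ofList (as ++ bs)) with
          | nil => simp
          | cons x xs ih => simp [ih]; omega
        rw [hsplit, sum_count_sub _ _ _ hnd h1, sum_count_sub _ _ _ hnd h2]

-- ---- A evaluates to the symmetric-difference size ----
lemma number_needed_eq (a b : String) :
    number_needed a b
      = ((((a.toList : Multiset Char) - b.toList).card
          + ((b.toList : Multiset Char) - a.toList).card : ℕ) : Int) := by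
  unfold number_needed
  rw [step_inc_eq, step_dec_eq]
  set as := a.toList
  set bs := b.toList
  set d1 : PySem.Dict Char Int := as.foldl (fun d c => d.insert c (d.getD c 0 + 1)) PySem.Dict.empty with hd1
  set d2 : PySem.Dict Char Int := bs.foldl (fun d c => d.insert c (d.getD c 0 - 1)) d1 with hd2
  have hget : ∀ k, d2.getD k 0 = ((as.count k : Int)) - (bs.count k : Int) := by
    intro k
    rw [hd2, getD_foldl_insert_sub_one, hd1, PySem.Dict.getD_foldl_insert_add_one]
    simp
  have hkeys : d2.keys = PySem.Set.ofList (as ++ bs) := by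
    rw [hd2, PySem.Dict.keys_foldl_insert, hd1, PySem.Dict.keys_foldl_insert]
    rw [PySem.Dict.keys_empty, PySem.Set.update_nil_left, ← PySem.Set.ofList_append]
  rw [PySem.List.foldl_add, hkeys]
  rw [← hd2]
  simp only [hget]
  rw [zero_add, sum_abs_eq]

-- ---- B evaluates to the same quantity ----
lemma number_needed_alt_eq (a b : String) :
    number_needed_alt a b
      = ((((a.toList : Multiset Char) - b.toList).card
          + ((b.toList : Multiset Char) - a.toList).card : ℕ) : Int) := by
  unfold number_needed_alt
  have pa : (PySem.List.sorted a.toList (fun c => c) false).Pairwise (· ≤ ·) :=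
    PySem.List.sorted_pairwise _ _
  have pb : (PySem.List.sorted b.toList (fun c => c) false).Pairwise (· ≤ ·) :=
    PySem.List.sorted_pairwise _ _
  have ma : ((PySem.List.sorted a.toList (fun c => c) false : List Char) : Multiset Char)
      = (a.toList : Multiset Char) := Quot.sound (PySem.List.sorted_perm _ _ _)
  have mb : ((PySem.List.sorted b.toList (fun c => c) false : List Char) : Multiset Char)
      = (b.toList : Multiset Char) := Quot.sound (PySem.List.sorted_perm _ _ _)
  rw [nnMerge_eq' ((PySem.List.sorted a.toList (fun c => c) false).length
      + (PySem.List.sorted b.toList (fun c => c) false).length) _ _ le_rfl pa pb, ma, mb]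

-- ===== VERDICT (by name: the statement is the Claim_ definition above) =====
theorem number_needed_spec : Claim_equal_number_needed := by
  intro a b _
  unfold Spec_number_needed
  rw [number_needed_eq, number_needed_alt_eq]
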